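-- pv_equiv track=rewrite | github.com/Skuldur/LSTM-Text-Generation | utils.py | getInputOutput
-- ===== SOURCE A (Python) =====
-- def getInputOutput(text, n_chars, char_to_int, sequence_length):
--   input = []
--   output = []
--   for i in range(0, n_chars - sequence_length, 1):
--     sequence_in = text[i:i + sequence_length]
--     sequence_out = text[i + sequence_length]
--     input.append([char_to_int[char] for char in sequence_in])
--     output.append(char_to_int[sequence_out])
--
--   return input, output
-- ===== SOURCE B (Python) =====
-- def getInputOutput(text, n_chars, char_to_int, sequence_length):
--     inputs, outputs = [], []
--     if n_chars - sequence_length <= 0: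
--         return inputs, outputs
--     window = []
--     for j in range(n_chars):
--         code = char_to_int[text[j]]
--         if len(window) == sequence_length:
--             inputs.append(window)
--             outputs.append(code)
--         window = window + [code]
--         if len(window) > sequence_length:
--             window = window[1:]
--     return inputs, outputs
-- ===== Notes on version B (the rewrite author's own statement) =====
-- stated objective: alternative
-- what changed: B makes a single pass over positions 0..n_chars-1 maintaining a rolling window of the last sequence_length codes (emit window+current code when the window is full, then shift), instead of A's loop over window start positions that re-slices text and re-looks-up every window character.
-- outside the precondition, e.g. on getInputOutput('y', 1, {'y': 9}, -1): A returns ([[], []], [9, 9]), B returns ([], [])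
import Mathlib
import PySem

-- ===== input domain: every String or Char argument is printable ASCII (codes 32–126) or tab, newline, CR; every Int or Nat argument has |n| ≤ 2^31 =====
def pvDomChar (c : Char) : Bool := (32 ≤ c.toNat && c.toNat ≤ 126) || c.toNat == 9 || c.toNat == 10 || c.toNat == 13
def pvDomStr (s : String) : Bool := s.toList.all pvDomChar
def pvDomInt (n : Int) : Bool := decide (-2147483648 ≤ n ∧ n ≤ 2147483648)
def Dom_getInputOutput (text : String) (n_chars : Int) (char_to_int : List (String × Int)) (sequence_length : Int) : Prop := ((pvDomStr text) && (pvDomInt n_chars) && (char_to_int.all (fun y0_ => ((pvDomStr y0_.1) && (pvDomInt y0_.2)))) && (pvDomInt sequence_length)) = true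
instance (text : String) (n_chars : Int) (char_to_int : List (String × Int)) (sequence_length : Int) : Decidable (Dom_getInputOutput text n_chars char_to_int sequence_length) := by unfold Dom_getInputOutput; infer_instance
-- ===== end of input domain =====

-- B replaces A's loop over window start positions (each window re-sliced from text and re-looked-up
-- char by char) with a single pass over character positions maintaining a rolling window of the last
-- sequence_length codes; equal return values on Pre_.

-- ===== PORT A =====
def getInputOutput (text : String) (n_chars : Int) (char_to_int : List (String × Int)) (sequence_length : Int) : List (List Int) × List Int :=
  let cs := text.toList
  let d := PySem.Dict.ofList char_to_int
  (PySem.List.pyRange 0 (n_chars - sequence_length) 1).foldl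
    (fun (acc : List (List Int) × List Int) i =>
      let sequence_in := PySem.List.slice cs (some i) (some (i + sequence_length))
      let sequence_out := PySem.List.pyGetD cs (i + sequence_length) ' '  -- default unreachable under Pre_
      (acc.1 ++ [sequence_in.map (fun c => PySem.Dict.getD d (String.ofList [c]) 0)],
       acc.2 ++ [PySem.Dict.getD d (String.ofList [sequence_out]) 0]))
    ([], [])

-- ===== PORT B =====
-- rolling-window single pass: state is (inputs, outputs, window of the last ≤ sequence_length codes)
def getInputOutput_alt (text : String) (n_chars : Int) (char_to_int : List (String × Int)) (sequence_length : Int) : List (List Int) × List Int :=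
  if n_chars - sequence_length ≤ 0 then ([], [])
  else
    let cs := text.toList
    let d := PySem.Dict.ofList char_to_int
    let st := (PySem.List.pyRange 0 n_chars 1).foldl
      (fun (acc : List (List Int) × List Int × List Int) j =>
        let code := PySem.Dict.getD d (String.ofList [PySem.List.pyGetD cs j ' ']) 0  -- text[j]; default unreachable under Pre_
        let window := acc.2.2
        let acc2 : List (List Int) × List Int :=
          if ((window.length : Int) = sequence_length) then
            (acc.1 ++ [window], acc.2.1 ++ [code])
          else (acc.1, acc.2.1)
        let w := window ++ [code]
        (acc2.1, acc2.2, if sequence_length < (w.length : Int) then PySem.List.slice w (some 1) none else w))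
      ([], [], [])
    (st.1, st.2.1)

-- ===== PRECONDITION & SPEC =====
-- Pre_ excludes the inputs where A raises (KeyError on a character of text[:n_chars] missing from
-- char_to_int, or IndexError when n_chars exceeds len(text)) and, additionally, negative
-- sequence_length with a non-empty window loop: a negative window length is outside the function's
-- natural domain, and A's values there come from Python's negative-index/slice wraparound over the
-- full text while B's rolling window (whose length is never negative) emits nothing.
def Pre_getInputOutput (text : String) (n_chars : Int) (char_to_int : List (String × Int)) (sequence_length : Int) : Prop :=
  n_chars - sequence_length ≤ 0 ∨
    (0 ≤ sequence_length ∧ n_chars ≤ (text.toList.length : Int) ∧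
      ((text.toList.take n_chars.toNat).all
        (fun c => (PySem.Dict.ofList char_to_int).contains (String.ofList [c]))) = true)
instance (text : String) (n_chars : Int) (char_to_int : List (String × Int)) (sequence_length : Int) : Decidable (Pre_getInputOutput text n_chars char_to_int sequence_length) := by unfold Pre_getInputOutput; infer_instance

def pvWitness_getInputOutput : String × Int × (List (String × Int)) × Int :=
  ("abc", 3, [("a", 0), ("b", 1), ("c", 2)], 2)

def Spec_getInputOutput (text : String) (n_chars : Int) (char_to_int : List (String × Int)) (sequence_length : Int) (out : List (List Int) × List Int) : Prop := out = getInputOutput_alt text n_chars char_to_int sequence_length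
instance (text : String) (n_chars : Int) (char_to_int : List (String × Int)) (sequence_length : Int) (out : List (List Int) × List Int) : Decidable (Spec_getInputOutput text n_chars char_to_int sequence_length out) := by unfold Spec_getInputOutput; infer_instance

-- ===== CLAIM (what is proved, stated in full; the proofs are below) =====
def Claim_equal_getInputOutput : Prop := ∀ (text : String) (n_chars : Int) (char_to_int : List (String × Int)) (sequence_length : Int), Dom_getInputOutput text n_chars char_to_int sequence_length → Pre_getInputOutput text n_chars char_to_int sequence_length → Spec_getInputOutput text n_chars char_to_int sequence_length (getInputOutput text n_chars char_to_int sequence_length)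

-- ===== LEMMAS AND PROOFS =====

-- The loop invariant of B's single pass: after the first m steps the accumulated inputs/outputs are
-- exactly A's per-start-index values for the starts already completed, and the window holds the codes
-- of cs[max 0 (m - L) : m].
theorem rolling_inv (cs : List Char) (f : Char → Int) (L : Int) (hL : 0 ≤ L)
    (m : Nat) (hm : m ≤ cs.length) :
    (PySem.List.pyRange 0 (m : Int) 1).foldl
      (fun (acc : List (List Int) × List Int × List Int) j =>
        let code := f (PySem.List.pyGetD cs j ' ')
        let window := acc.2.2
        let acc2 : List (List Int) × List Int :=
          if ((window.length : Int) = L) then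
            (acc.1 ++ [window], acc.2.1 ++ [code])
          else (acc.1, acc.2.1)
        let w := window ++ [code]
        (acc2.1, acc2.2, if L < (w.length : Int) then PySem.List.slice w (some 1) none else w))
      ([], [], [])
    = ((PySem.List.pyRange 0 ((m : Int) - L) 1).map
         (fun i => (PySem.List.slice cs (some i) (some (i + L))).map f),
       (PySem.List.pyRange 0 ((m : Int) - L) 1).map
         (fun i => f (PySem.List.pyGetD cs (i + L) ' ')),
       ((cs.take m).drop (m - L.toNat)).map f) := by
  induction m with
  | zero =>
      rw [PySem.List.pyRange_one_eq_nil (by omega), PySem.List.pyRange_one_eq_nil (by omega)]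
      simp
  | succ m ih =>
      have hm' : m ≤ cs.length := by omega
      have hcast : ((m + 1 : Nat) : Int) = (m : Int) + 1 := by push_cast; ring
      rw [hcast, PySem.List.pyRange_one_succ_right (by omega), List.foldl_append, ih hm']
      simp only [List.foldl_cons, List.foldl_nil]
      have hgetm : PySem.List.pyGetD cs (m : Int) ' ' = cs[m]'(by omega) := by
        rw [PySem.List.pyGetD_eq_getElem _ ' ' (by omega) (by omega)]; simp
      have htakesucc : cs.take (m + 1) = cs.take m ++ [cs[m]'(by omega)] := by
        rw [List.take_add_one, List.getElem?_eq_getElem (by omega)]; rfl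
      have hwinlen : ((((cs.take m).drop (m - L.toNat)).map f).length : Int)
          = (m : Int) - ((m - L.toNat : Nat) : Int) := by
        simp [List.length_drop, List.length_take]; omega
      by_cases hfull : L.toNat ≤ m
      · -- window full: emits (window, code), window shifts left
        have hcond : ((((cs.take m).drop (m - L.toNat)).map f).length : Int) = L := by
          rw [hwinlen]; omega
        rw [if_pos hcond]
        have hrange : PySem.List.pyRange 0 ((m : Int) + 1 - L) 1
            = PySem.List.pyRange 0 ((m : Int) - L) 1 ++ [(m : Int) - L] := by
          have h : (m : Int) + 1 - L = ((m : Int) - L) + 1 := by ring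
          rw [h, PySem.List.pyRange_one_succ_right (by omega)]
        rw [hrange]
        simp only [List.map_append, List.map_cons, List.map_nil]
        have hwin_eq : ((cs.take m).drop (m - L.toNat)).map f
            = (PySem.List.slice cs (some ((m : Int) - L)) (some ((m : Int) - L + L))).map f := by
          rw [PySem.List.slice_toNat _ (by omega) (by omega)]
          have h1 : ((m : Int) - L).toNat = m - L.toNat := by omega
          have h2 : ((m : Int) - L + L).toNat = m := by omega
          rw [h1, h2, List.drop_take]
        have hout_eq : f (PySem.List.pyGetD cs ((m : Int)) ' ')
            = f (PySem.List.pyGetD cs (((m : Int) - L) + L) ' ') := by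
          have h : (m : Int) - L + L = (m : Int) := by ring
          rw [h]
        have hwlen : (((((cs.take m).drop (m - L.toNat)).map f) ++ [f (PySem.List.pyGetD cs (m : Int) ' ')]).length : Int) = L + 1 := by
          rw [List.length_append]; push_cast; rw [hwinlen]; simp; omega
        refine Prod.ext ?_ (Prod.ext ?_ ?_)
        · exact congrArg (fun w => (PySem.List.pyRange 0 ((m : Int) - L) 1).map
            (fun i => (PySem.List.slice cs (some i) (some (i + L))).map f) ++ [w]) hwin_eq
        · exact congrArg (fun v => (PySem.List.pyRange 0 ((m : Int) - L) 1).map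
            (fun i => f (PySem.List.pyGetD cs (i + L) ' ')) ++ [v]) hout_eq
        · -- window update: drop 1 of (window ++ [code])
          have hlt : L < (((((cs.take m).drop (m - L.toNat)).map f) ++ [f (PySem.List.pyGetD cs (m : Int) ' ')]).length : Int) := by
            rw [hwlen]; omega
          have hsub : m + 1 - L.toNat = (m - L.toNat) + 1 := by omega
          rw [if_pos hlt, PySem.List.slice_from_one, hgetm, htakesucc, hsub,
              ← List.tail_drop,
              List.drop_append_of_le_length (by rw [List.length_take]; omega)]
          simp
      · -- window not yet full: no emission, window grows
        have hcond : ¬ ((((cs.take m).drop (m - L.toNat)).map f).length : Int) = L := by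
          rw [hwinlen]; omega
        rw [if_neg hcond]
        have hr1 : PySem.List.pyRange 0 ((m : Int) + 1 - L) 1 = [] :=
          PySem.List.pyRange_one_eq_nil (by omega)
        have hr0 : PySem.List.pyRange 0 ((m : Int) - L) 1 = [] :=
          PySem.List.pyRange_one_eq_nil (by omega)
        rw [hr1, hr0]
        simp only [List.map_nil]
        refine Prod.ext rfl (Prod.ext rfl ?_)
        have hnlt : ¬ L < (((((cs.take m).drop (m - L.toNat)).map f) ++ [f (PySem.List.pyGetD cs (m : Int) ' ')]).length : Int) := by
          rw [List.length_append]; push_cast; rw [hwinlen]; simp; omega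
        rw [if_neg hnlt, hgetm, htakesucc]
        have h0 : m - L.toNat = 0 := by omega
        have h1 : m + 1 - L.toNat = 0 := by omega
        rw [h0, h1]
        simp only [List.drop_zero, List.map_append, List.map_cons, List.map_nil, List.map_take]

-- ===== VERDICT (by name: the statement is the Claim_ definition above) =====
theorem getInputOutput_spec : Claim_equal_getInputOutput := by
  intro text n_chars char_to_int sequence_length _hdom hpre
  unfold Spec_getInputOutput getInputOutput getInputOutput_alt
  by_cases hn : n_chars - sequence_length <= 0
  · rw [if_pos hn, PySem.List.pyRange_one_eq_nil (by omega)]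
    rfl
  · rcases hpre with h | ⟨hL, hlen, _hall⟩
    · exact absurd h hn
    rw [if_neg hn]
    dsimp only
    have hn0 : 0 ≤ n_chars := by omega
    have hcast : ((n_chars.toNat : Nat) : Int) = n_chars := Int.toNat_of_nonneg hn0
    rw [← hcast]
    rw [rolling_inv text.toList
          (fun c => PySem.Dict.getD (PySem.Dict.ofList char_to_int) (String.ofList [c]) 0)
          sequence_length hL n_chars.toNat (by omega)]
    rw [PySem.List.foldl_prod_mk
          (f := fun (acc : List (List Int)) i => acc ++ [(PySem.List.slice text.toList (some i) (some (i + sequence_length))).map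
            (fun c => PySem.Dict.getD (PySem.Dict.ofList char_to_int) (String.ofList [c]) 0)])
          (g := fun (acc : List Int) i => acc ++ [PySem.Dict.getD (PySem.Dict.ofList char_to_int)
            (String.ofList [PySem.List.pyGetD text.toList (i + sequence_length) ' ']) 0]),
        PySem.List.foldl_append_singleton_eq_map, PySem.List.foldl_append_singleton_eq_map]
    simp
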